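-- pv_equiv track=rewrite | github.com/santisoler/tesina-fisica | Proyecciones/Proyecciones.py | UTM_zone_calculator
-- ===== SOURCE A (Python) =====
-- def UTM_zone_calculator(lon):
--     """
--     Calculates the UTM zone for a given latitude.
--     """
--     if abs(lon) > 180:
--         lon = lon - 360
--     zones = [[-180 + 6*i,-174 + 6*i] for i in range(60)]
--     for i in range(len(zones)):
--         if zones[i][0] <= lon < zones[i][1]:
--             zone = i+1
--             return zone
-- ===== SOURCE B (Python) =====
-- def UTM_zone_calculator(lon):
--     """
--     Calculates the UTM zone for a given longitude (closed form, no table scan).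
--     """
--     if abs(lon) > 180:
--         lon = lon - 360
--     zone = (lon + 180) // 6 + 1
--     if 1 <= zone <= 60:
--         return zone
-- ===== Notes on version B (the rewrite author's own statement) =====
-- stated objective: simpler
-- what changed: Replaces the interval-table construction and linear scan with a direct floor-division formula for the zone number, guarded by a range check (implicit None otherwise).
import Mathlib
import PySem

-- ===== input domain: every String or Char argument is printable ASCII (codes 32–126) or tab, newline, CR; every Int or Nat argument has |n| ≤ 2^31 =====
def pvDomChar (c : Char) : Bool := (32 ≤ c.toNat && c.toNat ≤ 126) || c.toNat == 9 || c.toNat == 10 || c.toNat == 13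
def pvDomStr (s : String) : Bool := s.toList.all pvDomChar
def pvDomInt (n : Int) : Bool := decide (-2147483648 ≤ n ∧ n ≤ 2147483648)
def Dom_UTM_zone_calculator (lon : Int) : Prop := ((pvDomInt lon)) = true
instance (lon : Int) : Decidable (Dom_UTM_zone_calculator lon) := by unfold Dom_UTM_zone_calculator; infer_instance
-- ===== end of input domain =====

-- B replaces A's 60-interval table and linear scan by the closed-form (lon+180)//6 + 1 with a 1..60 range guard: simpler.


-- ===== PORT A =====
-- the indexed scan 'for i in range(len(zones)): if zones[i][0] <= lon < zones[i][1]: return i+1'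
def pvScanZones (lon : Int) : List (Int × Int) → Nat → Option Int
  | [], _ => none
  | (a, b) :: rest, i => if a ≤ lon ∧ lon < b then some ((i : Int) + 1) else pvScanZones lon rest (i + 1)

def UTM_zone_calculator (lon : Int) : Option Int :=
  let lon := if 180 < |lon| then lon - 360 else lon
  let zones := (List.range 60).map (fun (i : Nat) => ((-180 + 6 * (i : Int)), (-174 + 6 * (i : Int))))
  pvScanZones lon zones 0

-- ===== PORT B =====
def UTM_zone_calculator_alt (lon : Int) : Option Int :=
  let lon := if 180 < |lon| then lon - 360 else lon
  let zone := PySem.Int.floordiv (lon + 180) 6 + 1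
  if 1 ≤ zone ∧ zone ≤ 60 then some zone else none

-- ===== PRECONDITION & SPEC =====
def Spec_UTM_zone_calculator (lon : Int) (out : Option Int) : Prop := out = UTM_zone_calculator_alt lon
instance (lon : Int) (out : Option Int) : Decidable (Spec_UTM_zone_calculator lon out) := by unfold Spec_UTM_zone_calculator; infer_instance

-- ===== CLAIM (what is proved, stated in full; the proofs are below) =====
def Claim_equal_UTM_zone_calculator : Prop := ∀ (lon : Int), Dom_UTM_zone_calculator lon → Spec_UTM_zone_calculator lon (UTM_zone_calculator lon)

-- ===== LEMMAS AND PROOFS =====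

-- the scan over the consecutive 6°-intervals starting at index k returns the closed-form zone iff lon falls in their union
theorem pvScanZones_range' (lon : Int) (n k : Nat) :
    pvScanZones lon ((List.range' k n).map (fun (i : Nat) => ((-180 + 6 * (i : Int)), (-174 + 6 * (i : Int))))) k =
      if -180 + 6 * (k : Int) ≤ lon ∧ lon < -180 + 6 * ((k : Int) + (n : Int)) then
        some (PySem.Int.floordiv (lon + 180) 6 + 1) else none := by
  induction n generalizing k with
  | zero =>
    simp [pvScanZones]
  | succ n ih =>
    rw [List.range'_succ]
    simp only [List.map_cons, pvScanZones]
    by_cases h : -180 + 6 * (k : Int) ≤ lon ∧ lon < -174 + 6 * (k : Int)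
    · rw [if_pos h, if_pos (by push_cast; omega)]
      have hq : PySem.Int.floordiv (lon + 180) 6 = (k : Int) := by
        rw [PySem.Int.floordiv_eq_iff_of_pos (by norm_num)]
        omega
      rw [hq]
    · rw [if_neg h, ih (k + 1)]
      push_cast
      by_cases h2 : -180 + 6 * ((k : Int) + 1) ≤ lon ∧ lon < -180 + 6 * ((k : Int) + 1 + (n : Int))
      · rw [if_pos h2, if_pos (by omega)]
      · rw [if_neg h2, if_neg (by omega)]

-- ===== VERDICT (by name: the statement is the Claim_ definition above) =====
theorem UTM_zone_calculator_spec : Claim_equal_UTM_zone_calculator := by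
  intro lon _
  unfold Spec_UTM_zone_calculator UTM_zone_calculator UTM_zone_calculator_alt
  simp only
  set lon' := if 180 < |lon| then lon - 360 else lon with hlon'
  rw [List.range_eq_range', pvScanZones_range' lon' 60 0]
  have hfd : PySem.Int.floordiv (lon' + 180) 6 = (lon' + 180) / 6 :=
    PySem.Int.floordiv_eq_ediv_of_pos (by norm_num)
  by_cases h : -180 + 6 * ((0 : Nat) : Int) ≤ lon' ∧ lon' < -180 + 6 * (((0 : Nat) : Int) + ((60 : Nat) : Int))
  · rw [if_pos h, if_pos (by rw [hfd]; omega)]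
  · rw [if_neg h, if_neg (by rw [hfd]; omega)]
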